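-- pv_equiv track=rewrite | github.com/Fernando151177/comparador-super | scrapers/es/lidl_es.py | _word_overlap
-- ===== SOURCE A (Python) =====
-- def _word_overlap(query_words: set[str], product_words: set[str]) -> int:
--     """Cuenta cuántas palabras clave de la query aparecen en el producto.
--
--     Usa coincidencia de prefijo para cubrir plurales del español:
--     'pimiento' coincide con 'pimientos', 'verde' con 'verdes', etc.
--     Solo se consideran palabras de 4+ caracteres para evitar ruido.
--     """
--     count = 0
--     for qw in query_words:
--         if len(qw) < 4:
--             continue
--         for pw in product_words:
--             # prefijo: 'pimiento' en 'pimientos', o 'verdes' empieza por 'verde'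
--             if pw.startswith(qw) or qw.startswith(pw):
--                 count += 1
--                 break
--     return count
-- ===== SOURCE B (Python) =====
-- def _word_overlap(query_words: set[str], product_words: set[str]) -> int:
--     """Same count, but with precomputed hash sets instead of the nested scan:
--     prefix_set holds every prefix of every product word (so 'qw is a prefix of
--     some pw' is one lookup) and pset holds the product words themselves (so
--     'some pw is a prefix of qw' is len(qw)+1 lookups)."""
--     pset = set(product_words)
--     prefix_set = {pw[:k] for pw in product_words for k in range(len(pw) + 1)}
--     count = 0
--     for qw in query_words:
--         if len(qw) < 4:
--             continue
--         if qw in prefix_set or any(qw[:k] in pset for k in range(len(qw) + 1)):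
--             count += 1
--     return count
-- ===== Notes on version B (the rewrite author's own statement) =====
-- stated objective: faster
-- what changed: Replaces A's nested scan of product_words per query word by two precomputed hash sets (all prefixes of product words, and the product words themselves), so each query word is decided by O(L) set lookups instead of a scan over all product words.
import Mathlib
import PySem

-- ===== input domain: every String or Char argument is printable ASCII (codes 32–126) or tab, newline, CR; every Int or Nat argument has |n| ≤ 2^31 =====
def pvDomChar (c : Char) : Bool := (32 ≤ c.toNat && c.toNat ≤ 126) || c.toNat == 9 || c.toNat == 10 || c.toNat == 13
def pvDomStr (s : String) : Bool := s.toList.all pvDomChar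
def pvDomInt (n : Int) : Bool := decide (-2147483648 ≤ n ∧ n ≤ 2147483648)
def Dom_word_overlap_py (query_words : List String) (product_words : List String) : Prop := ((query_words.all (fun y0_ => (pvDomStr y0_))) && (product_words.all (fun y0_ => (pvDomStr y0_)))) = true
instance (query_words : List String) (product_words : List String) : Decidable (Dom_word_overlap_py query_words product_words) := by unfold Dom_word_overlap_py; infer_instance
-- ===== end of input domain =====

-- B replaces A's nested scan over product_words by two hash-set lookups per query word
-- (a set of all product-word prefixes, and the product-word set probed with each prefix
-- of the query word); same count, asymptotically faster.

-- ===== PORT A =====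
-- inner 'for pw in product_words: … break' loop of A
def pvInnerA (qw : String) : List String → Int → Int
  | [], c => c
  | pw :: rest, c =>
      if PySem.Str.startswith pw qw || PySem.Str.startswith qw pw then c + 1
      else pvInnerA qw rest c

def word_overlap_py (query_words : List String) (product_words : List String) : Int :=
  query_words.foldl
    (fun c qw => if PySem.Str.len qw < 4 then c else pvInnerA qw product_words c) 0

-- ===== PORT B =====
-- pw[:k] for 0 ≤ k ≤ len(pw): exact by PySem.List.slice_to_natCast (clamped take)
def pvPrefix (w : String) (k : Nat) : String := String.ofList (w.toList.take k)

-- {pw[:k] for pw in product_words for k in range(len(pw)+1)}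
def pvPrefixSet (ps : List String) : PySem.Set String :=
  PySem.Set.ofList (ps.flatMap (fun pw => (List.range (pw.toList.length + 1)).map (pvPrefix pw)))

def word_overlap_py_alt (query_words : List String) (product_words : List String) : Int :=
  query_words.foldl
    (fun c qw =>
      if PySem.Str.len qw < 4 then c
      else if PySem.Set.contains (pvPrefixSet product_words) qw
              || (List.range (qw.toList.length + 1)).any
                   (fun k => PySem.Set.contains (PySem.Set.ofList product_words) (pvPrefix qw k))
           then c + 1 else c) 0

-- ===== PRECONDITION & SPEC =====
def Spec_word_overlap_py (query_words : List String) (product_words : List String) (out : Int) : Prop := out = word_overlap_py_alt query_words product_words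
instance (query_words : List String) (product_words : List String) (out : Int) : Decidable (Spec_word_overlap_py query_words product_words out) := by unfold Spec_word_overlap_py; infer_instance

-- ===== CLAIM (what is proved, stated in full; the proofs are below) =====
def Claim_equal_word_overlap_py : Prop := ∀ (query_words : List String) (product_words : List String), Dom_word_overlap_py query_words product_words → Spec_word_overlap_py query_words product_words (word_overlap_py query_words product_words)

-- ===== LEMMAS AND PROOFS =====

-- a string's prefixes are exactly the pvPrefix values over range(len+1)
theorem pvPrefix_mem_iff (w q : String) :
    (∃ k, k ∈ List.range (w.toList.length + 1) ∧ pvPrefix w k = q) ↔ q.toList <+: w.toList := by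
  constructor
  · rintro ⟨k, -, rfl⟩
    simpa [pvPrefix] using List.take_prefix k w.toList
  · intro h
    refine ⟨q.toList.length, List.mem_range.mpr (Nat.lt_succ_of_le h.length_le), ?_⟩
    unfold pvPrefix
    rw [← List.prefix_iff_eq_take.mp h]
    simp

theorem pvContains_ofList_iff (xs : List String) (x : String) :
    PySem.Set.contains (PySem.Set.ofList xs) x = true ↔ x ∈ xs := by
  simp [PySem.Set.contains, PySem.Set.mem_ofList]

-- A's inner loop counts 1 iff some product word matches either direction
theorem pvInnerA_eq (qw : String) (ps : List String) (c : Int) :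
    pvInnerA qw ps c =
      if ps.any (fun pw => PySem.Str.startswith pw qw || PySem.Str.startswith qw pw)
      then c + 1 else c := by
  induction ps with
  | nil => simp [pvInnerA]
  | cons pw rest ih =>
      simp only [pvInnerA, ih, List.any_cons, Bool.or_eq_true]
      split_ifs <;> first | rfl | tauto

-- B's two set lookups decide exactly A's inner any
theorem pvCond_eq (qw : String) (ps : List String) :
    (PySem.Set.contains (pvPrefixSet ps) qw
      || (List.range (qw.toList.length + 1)).any
           (fun k => PySem.Set.contains (PySem.Set.ofList ps) (pvPrefix qw k)))
    = ps.any (fun pw => PySem.Str.startswith pw qw || PySem.Str.startswith qw pw) := by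
  rw [Bool.eq_iff_iff]
  simp only [Bool.or_eq_true, List.any_eq_true, pvPrefixSet, pvContains_ofList_iff,
    List.mem_flatMap, List.mem_map, PySem.Str.startswith_eq, PySem.Chars.startswith_iff]
  constructor
  · rintro (⟨pw, hpw, k, hk, hpref⟩ | ⟨k, hk, hmem⟩)
    · exact ⟨pw, hpw, Or.inl ((pvPrefix_mem_iff pw qw).mp ⟨k, hk, hpref⟩)⟩
    · refine ⟨pvPrefix qw k, hmem, Or.inr ?_⟩
      exact (pvPrefix_mem_iff qw (pvPrefix qw k)).mp ⟨k, hk, rfl⟩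
  · rintro ⟨pw, hpw, h | h⟩
    · obtain ⟨k, hk, hpref⟩ := (pvPrefix_mem_iff pw qw).mpr h
      exact Or.inl ⟨pw, hpw, k, hk, hpref⟩
    · obtain ⟨k, hk, hpref⟩ := (pvPrefix_mem_iff qw pw).mpr h
      exact Or.inr ⟨k, hk, hpref ▸ hpw⟩

-- ===== VERDICT (by name: the statement is the Claim_ definition above) =====
theorem word_overlap_py_spec : Claim_equal_word_overlap_py := by
  intro qs ps _
  unfold Spec_word_overlap_py word_overlap_py word_overlap_py_alt
  congr 1
  funext c qw
  rw [pvInnerA_eq, pvCond_eq]
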